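-- pv_equiv track=rewrite | github.com/ViniciusTBednascki/Studies | python/menor_string.py | menor_lex
-- ===== SOURCE A (Python) =====
-- def menor_lex(lista_de_strings):
--     menor = lista_de_strings[0].strip()
--     i = 0
--     while menor == '':
--         menor = lista_de_strings[i].strip()
--         i += 1
--     for i in lista_de_strings:
--         x = i.strip()
--         if x <= menor and x != '':
--             menor = x
--     return menor
-- ===== SOURCE B (Python) =====
-- def menor_lex(lista_de_strings):
--     candidatos = sorted(s.strip() for s in lista_de_strings if s.strip() != '')
--     return candidatos[0]
-- ===== Notes on version B (the rewrite author's own statement) =====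
-- stated objective: idiomatic
-- what changed: Replaces A's two hand-written scans (a while loop seeding a running minimum, then a <=-guarded update loop) by building the list of non-empty stripped strings once and taking the head of its sorted order.
import Mathlib
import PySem

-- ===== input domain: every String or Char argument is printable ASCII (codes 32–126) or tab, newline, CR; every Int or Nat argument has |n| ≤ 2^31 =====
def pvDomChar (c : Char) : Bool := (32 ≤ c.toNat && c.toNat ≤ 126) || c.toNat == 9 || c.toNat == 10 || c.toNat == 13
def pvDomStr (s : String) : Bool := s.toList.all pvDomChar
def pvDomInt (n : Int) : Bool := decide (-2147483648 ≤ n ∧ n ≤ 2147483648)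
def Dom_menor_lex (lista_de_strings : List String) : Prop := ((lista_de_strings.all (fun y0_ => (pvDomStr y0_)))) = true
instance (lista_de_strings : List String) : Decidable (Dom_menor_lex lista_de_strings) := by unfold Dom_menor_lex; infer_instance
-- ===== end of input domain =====

-- B replaces A's two hand-written scans (a while loop seeding a running minimum, then a guarded-update pass) by sorting the non-empty stripped strings and taking the head; idiomatic, not faster.

-- ===== PORT A =====
-- the 'while menor == ""' loop; fuel = lista.length + 1 suffices: within Pre_ the
-- loop exits before the fuel runs out (otherwise Python raises IndexError first).
def menorLexWhile (l : List String) (menor : String) (i : Nat) : Nat → String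
  | 0 => if menor = "" then "" else menor      -- fuel exhausted: unreachable inside Pre_
  | fuel + 1 =>
    if menor = "" then
      match PySem.List.pyGet? l (i : Int) with
      | none => ""                             -- IndexError: outside Pre_
      | some s => menorLexWhile l (PySem.Str.strip s) (i + 1) fuel
    else menor

def menor_lex (lista_de_strings : List String) : String :=
  match PySem.List.pyGet? lista_de_strings 0 with
  | none => ""                                 -- IndexError on the empty list: outside Pre_
  | some s0 =>
    let menor := menorLexWhile lista_de_strings (PySem.Str.strip s0) 0
                   (lista_de_strings.length + 1)
    lista_de_strings.foldl
      (fun menor i =>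
        let x := PySem.Str.strip i
        if x ≤ menor ∧ x ≠ "" then x else menor) menor

-- ===== PORT B =====
def menor_lex_alt (lista_de_strings : List String) : String :=
  let candidatos :=
    PySem.List.sorted
      ((lista_de_strings.map PySem.Str.strip).filter (fun x => x ≠ ""))
      (fun x => x) false
  match PySem.List.pyGet? candidatos 0 with
  | none => ""                                 -- IndexError: outside Pre_
  | some m => m

-- ===== PRECONDITION & SPEC =====
-- A raises IndexError exactly when no element strips to a non-empty string
-- (including the empty list); B raises IndexError there too; Pre_ admits every other input.
def Pre_menor_lex (lista_de_strings : List String) : Prop :=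
  (lista_de_strings.any (fun s => PySem.Str.strip s ≠ "")) = true
instance (lista_de_strings : List String) : Decidable (Pre_menor_lex lista_de_strings) := by
  unfold Pre_menor_lex; infer_instance

def pvWitness_menor_lex : List String := ["  b ", "", "a"]

def Spec_menor_lex (lista_de_strings : List String) (out : String) : Prop := out = menor_lex_alt lista_de_strings
instance (lista_de_strings : List String) (out : String) : Decidable (Spec_menor_lex lista_de_strings out) := by unfold Spec_menor_lex; infer_instance

-- ===== CLAIM (what is proved, stated in full; the proofs are below) =====
def Claim_equal_menor_lex : Prop := ∀ (lista_de_strings : List String), Dom_menor_lex lista_de_strings → Pre_menor_lex lista_de_strings → Spec_menor_lex lista_de_strings (menor_lex lista_de_strings)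

-- ===== LEMMAS AND PROOFS =====

-- the candidate list both programs are really about
def candList (l : List String) : List String :=
  (l.map PySem.Str.strip).filter (fun x => x ≠ "")

theorem mem_candList {l : List String} {x : String} :
    x ∈ candList l ↔ (∃ s ∈ l, PySem.Str.strip s = x) ∧ x ≠ "" := by
  simp [candList]

-- the body of A's for loop, as a named function (definitionally the lambda in the port)
def fstep (menor i : String) : String :=
  if PySem.Str.strip i ≤ menor ∧ PySem.Str.strip i ≠ "" then PySem.Str.strip i else menor

theorem fstep_pos {m s : String} (h : PySem.Str.strip s ≤ m ∧ PySem.Str.strip s ≠ "") :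
    fstep m s = PySem.Str.strip s := by
  unfold fstep; exact if_pos h

theorem fstep_neg {m s : String} (h : ¬ (PySem.Str.strip s ≤ m ∧ PySem.Str.strip s ≠ "")) :
    fstep m s = m := by
  unfold fstep; exact if_neg h

-- fold invariant: the result stays in {m0} ∪ candList l and is a lower bound of candList l
theorem foldl_fstep_spec (l : List String) :
    ∀ m0 : String,
      l.foldl fstep m0 ∈ m0 :: candList l ∧
      l.foldl fstep m0 ≤ m0 ∧
      ∀ y ∈ candList l, l.foldl fstep m0 ≤ y := by
  induction l with
  | nil =>
    intro m0
    refine ⟨List.mem_cons_self, le_refl m0, ?_⟩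
    intro y hy
    rw [mem_candList] at hy
    obtain ⟨⟨t, ht, _⟩, _⟩ := hy
    exact absurd ht (List.not_mem_nil)
  | cons s rest ih =>
    intro m0
    rw [List.foldl_cons]
    by_cases hx : PySem.Str.strip s ≤ m0 ∧ PySem.Str.strip s ≠ ""
    · rw [fstep_pos hx]
      obtain ⟨hmem, hle, hlb⟩ := ih (PySem.Str.strip s)
      have hcand : PySem.Str.strip s ∈ candList (s :: rest) :=
        mem_candList.mpr ⟨⟨s, List.mem_cons_self, rfl⟩, hx.2⟩
      refine ⟨?_, le_trans hle hx.1, ?_⟩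
      · rcases List.mem_cons.mp hmem with heq | hmemr
        · refine List.mem_cons_of_mem _ ?_
          rw [heq]; exact hcand
        · refine List.mem_cons_of_mem _ (mem_candList.mpr ?_)
          obtain ⟨⟨t, ht, hts⟩, hne⟩ := mem_candList.mp hmemr
          exact ⟨⟨t, List.mem_cons_of_mem _ ht, hts⟩, hne⟩
      · intro y hy
        obtain ⟨⟨t, ht, hts⟩, hne⟩ := mem_candList.mp hy
        rcases List.mem_cons.mp ht with rfl | ht'
        · exact hts ▸ hle
        · exact hlb y (mem_candList.mpr ⟨⟨t, ht', hts⟩, hne⟩)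
    · rw [fstep_neg hx]
      obtain ⟨hmem, hle, hlb⟩ := ih m0
      refine ⟨?_, hle, ?_⟩
      · rcases List.mem_cons.mp hmem with heq | hmemr
        · rw [heq]; exact List.mem_cons_self
        · refine List.mem_cons_of_mem _ (mem_candList.mpr ?_)
          obtain ⟨⟨t, ht, hts⟩, hne⟩ := mem_candList.mp hmemr
          exact ⟨⟨t, List.mem_cons_of_mem _ ht, hts⟩, hne⟩
      · intro y hy
        obtain ⟨⟨t, ht, hts⟩, hne⟩ := mem_candList.mp hy
        rcases List.mem_cons.mp ht with rfl | ht'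
        · -- strip t not an improvement: either empty (contradicts hne) or > m0
          rcases not_and_or.mp hx with hgt | hemp
          · exact le_trans hle (le_of_not_ge (fun hge => hgt (hts ▸ hge)))
          · exact absurd (hts ▸ not_not.mp hemp) hne
        · exact hlb y (mem_candList.mpr ⟨⟨t, ht', hts⟩, hne⟩)

-- the while loop lands in candList, given a non-empty candidate within fuel reach
theorem menorLexWhile_spec (l : List String) :
    ∀ (fuel : Nat) (menor : String) (i : Nat),
      (menor ≠ "" → menor ∈ candList l) →
      (menor = "" → ∃ j, i ≤ j ∧ j < l.length ∧
          PySem.Str.strip (l.getD j "") ≠ "" ∧ j - i < fuel) →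
      menorLexWhile l menor i fuel ∈ candList l := by
  intro fuel
  induction fuel with
  | zero =>
    intro menor i h1 h2
    by_cases hm : menor = ""
    · obtain ⟨j, hij, hjl, hs, hlt⟩ := h2 hm; omega
    · rw [menorLexWhile, if_neg hm]; exact h1 hm
  | succ f ih =>
    intro menor i h1 h2
    by_cases hm : menor = ""
    · rw [menorLexWhile, if_pos hm]
      obtain ⟨j, hij, hjl, hs, hlt⟩ := h2 hm
      have hi : i < l.length := by omega
      have hget : PySem.List.pyGet? l (i : Int) = some (l.getD i "") := by
        rw [PySem.List.pyGet?_natCast, List.getElem?_eq_getElem hi,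
          List.getD_eq_getElem l "" hi]
      rw [hget]
      refine ih (PySem.Str.strip (l.getD i "")) (i + 1) ?_ ?_
      · intro hne
        refine mem_candList.mpr ⟨⟨l.getD i "", ?_, rfl⟩, hne⟩
        rw [List.getD_eq_getElem l "" hi]
        exact List.getElem_mem hi
      · intro hemp
        refine ⟨j, ?_, hjl, hs, ?_⟩
        · rcases Nat.eq_or_lt_of_le hij with rfl | hlt'
          · exact absurd hemp hs
          · omega
        · have : i ≠ j := by
            rintro rfl; exact hs hemp
          omega
    · rw [menorLexWhile, if_neg hm]; exact h1 hm

-- the head of the sorted candidate list is the least candidate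
theorem alt_eq_head {l : List String} {m : String} {tc : List String}
    (h : PySem.List.sorted (candList l) (fun x => x) false = m :: tc) :
    menor_lex_alt l = m := by
  simp only [menor_lex_alt]
  rw [show ((l.map PySem.Str.strip).filter (fun x => x ≠ "")) = candList l from rfl, h,
    PySem.List.pyGet?_zero_cons]

-- ===== VERDICT (by name: the statement is the Claim_ definition above) =====
theorem menor_lex_spec : Claim_equal_menor_lex := by
  intro l hdom hpre
  unfold Pre_menor_lex at hpre
  rw [List.any_eq_true] at hpre
  obtain ⟨s, hs, hsne⟩ := hpre
  have hsne : PySem.Str.strip s ≠ "" := by simpa using hsne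
  -- l is non-empty
  obtain ⟨a, t, rfl⟩ : ∃ a t, l = a :: t := by
    cases l with
    | nil => exact absurd hs (List.not_mem_nil)
    | cons a t => exact ⟨a, t, rfl⟩
  -- the while loop's result is a candidate
  have hm0 : menorLexWhile (a :: t) (PySem.Str.strip a) 0 ((a :: t).length + 1)
      ∈ candList (a :: t) := by
    refine menorLexWhile_spec (a :: t) _ _ _ ?_ ?_
    · intro hne
      exact mem_candList.mpr ⟨⟨a, List.mem_cons_self, rfl⟩, hne⟩
    · intro _
      obtain ⟨j, hj, hgj⟩ := List.mem_iff_getElem.mp hs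
      refine ⟨j, Nat.zero_le j, hj, ?_, by omega⟩
      rw [List.getD_eq_getElem _ "" hj, hgj]
      exact hsne
  set m0 := menorLexWhile (a :: t) (PySem.Str.strip a) 0 ((a :: t).length + 1) with hm0def
  -- A's result
  have hA : menor_lex (a :: t) = (a :: t).foldl fstep m0 := by
    unfold menor_lex
    rw [PySem.List.pyGet?_zero_cons]
    rfl
  obtain ⟨hmem, _, hlb⟩ := foldl_fstep_spec (a :: t) m0
  have hrc : (a :: t).foldl fstep m0 ∈ candList (a :: t) := by
    rcases List.mem_cons.mp hmem with heq | h
    · rw [heq]; exact hm0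
    · exact h
  -- B's result: head of the sorted candidates
  have hcne : candList (a :: t) ≠ [] := by
    intro hnil; rw [hnil] at hm0; exact List.not_mem_nil hm0
  obtain ⟨m, tc, hsorted⟩ :
      ∃ m tc, PySem.List.sorted (candList (a :: t)) (fun x => x) false = m :: tc := by
    cases hcase : PySem.List.sorted (candList (a :: t)) (fun x => x) false with
    | nil =>
      have := PySem.List.length_sorted (xs := candList (a :: t)) (key := fun x => x)
        (rev := false)
      rw [hcase] at this
      exact absurd (List.length_eq_zero_iff.mp this.symm) hcne
    | cons m tc => exact ⟨m, tc, rfl⟩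
  have hmc : m ∈ candList (a :: t) := by
    have : m ∈ PySem.List.sorted (candList (a :: t)) (fun x => x) false := by
      rw [hsorted]; exact List.mem_cons_self
    exact (PySem.List.mem_sorted _ _ _ _).mp this
  have hmin : ∀ y ∈ candList (a :: t), m ≤ y :=
    fun y hy => PySem.List.key_head_sorted_le _ _ hsorted y hy
  -- both are the least candidate
  unfold Spec_menor_lex
  rw [hA, alt_eq_head hsorted]
  exact le_antisymm (hlb m hmc) (hmin _ hrc)
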